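-- pv_equiv track=rewrite | github.com/dariadobrolinski/ds_and_algo | time_complexities.py | count_zero_sums
-- ===== SOURCE A (Python) =====
-- def count_zero_sums(arr):
--     count = 0
--     n = len(arr)
--     for i in range(n): # loop through n elements
--         for j in range(i+1, n): # loop through n elements
--             for k in range(j+1, n): # loop through n elements
--                 if arr[i] + arr[j] + arr[k] == 0:
--                     count += 1
--     return count
-- ===== SOURCE B (Python) =====
-- def count_zero_sums(arr):
--     count = 0
--     seen = {}
--     n = len(arr)
--     for j in range(n):
--         for k in range(j + 1, n):
--             count += seen.get(-(arr[j] + arr[k]), 0)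
--         seen[arr[j]] = seen.get(arr[j], 0) + 1
--     return count
-- ===== Notes on version B (the rewrite author's own statement) =====
-- stated objective: faster
-- what changed: Replaces the O(n^3) triple nested loop by a single pass over pairs (j,k) that looks up the complement -(arr[j]+arr[k]) in a running hash counter of the elements before j, counting each zero-sum triple at its middle index.
import Mathlib
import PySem

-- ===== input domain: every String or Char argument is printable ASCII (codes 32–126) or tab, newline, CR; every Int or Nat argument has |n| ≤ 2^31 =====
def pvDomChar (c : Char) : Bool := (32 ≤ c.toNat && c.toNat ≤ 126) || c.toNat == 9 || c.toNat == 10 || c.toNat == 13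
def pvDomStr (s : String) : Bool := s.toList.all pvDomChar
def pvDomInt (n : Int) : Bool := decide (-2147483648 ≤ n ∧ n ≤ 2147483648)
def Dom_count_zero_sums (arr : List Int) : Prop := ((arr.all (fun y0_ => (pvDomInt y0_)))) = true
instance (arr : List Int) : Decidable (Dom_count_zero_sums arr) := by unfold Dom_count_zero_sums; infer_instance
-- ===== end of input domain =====

-- B replaces A's cubic triple loop by a quadratic pair scan that looks the complement of each
-- pair sum up in a running counter of the elements seen so far (asymptotically faster, O(n^2) vs O(n^3)).

-- ===== PORT A =====
def count_zero_sums (arr : List Int) : Int :=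
  let n : Int := (arr.length : Int)
  (PySem.List.pyRange 0 n).foldl (fun count i =>
    (PySem.List.pyRange (i + 1) n).foldl (fun count j =>
      (PySem.List.pyRange (j + 1) n).foldl (fun count k =>
        if PySem.List.pyGetD arr i 0 + PySem.List.pyGetD arr j 0 + PySem.List.pyGetD arr k 0 = 0
        then count + 1 else count) count) count) 0

-- ===== PORT B =====
def count_zero_sums_alt (arr : List Int) : Int :=
  let n : Int := (arr.length : Int)
  let st := (PySem.List.pyRange 0 n).foldl
    (fun (st : Int × PySem.Dict Int Int) j =>
      let count := (PySem.List.pyRange (j + 1) n).foldl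
        (fun count k =>
          count + st.2.getD (-(PySem.List.pyGetD arr j 0 + PySem.List.pyGetD arr k 0)) 0) st.1
      (count, st.2.insert (PySem.List.pyGetD arr j 0)
        (st.2.getD (PySem.List.pyGetD arr j 0) 0 + 1)))
    ((0 : Int), (PySem.Dict.empty : PySem.Dict Int Int))
  st.1

-- ===== PRECONDITION & SPEC =====
def Spec_count_zero_sums (arr : List Int) (out : Int) : Prop := out = count_zero_sums_alt arr
instance (arr : List Int) (out : Int) : Decidable (Spec_count_zero_sums arr out) := by unfold Spec_count_zero_sums; infer_instance

-- ===== CLAIM (what is proved, stated in full; the proofs are below) =====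
def Claim_equal_count_zero_sums : Prop := ∀ (arr : List Int), Dom_count_zero_sums arr → Spec_count_zero_sums arr (count_zero_sums arr)

-- ===== LEMMAS AND PROOFS =====

/-- `arr[i]` for an in-range Nat index, as the proofs read it. -/
def pvA (arr : List Int) (i : Nat) : Int := arr.getD i 0

/-- The 0/1 indicator of `arr[i] + arr[j] + arr[k] == 0`. -/
def pvE (arr : List Int) (i j k : Nat) : Int :=
  if pvA arr i + pvA arr j + pvA arr k = 0 then 1 else 0

/-- B's loop body, named so the proofs can speak about the fold. -/
def pvStepB (arr : List Int) (st : Int × PySem.Dict Int Int) (j : Int) :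
    Int × PySem.Dict Int Int :=
  let n : Int := (arr.length : Int)
  let count := (PySem.List.pyRange (j + 1) n).foldl
    (fun count k =>
      count + st.2.getD (-(PySem.List.pyGetD arr j 0 + PySem.List.pyGetD arr k 0)) 0) st.1
  (count, st.2.insert (PySem.List.pyGetD arr j 0)
    (st.2.getD (PySem.List.pyGetD arr j 0) 0 + 1))

lemma pv_alt_eq_fold (arr : List Int) :
    count_zero_sums_alt arr =
      ((PySem.List.pyRange 0 (arr.length : Int)).foldl (pvStepB arr)
        ((0 : Int), (PySem.Dict.empty : PySem.Dict Int Int))).1 := rfl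

/-- A `pyRange` fold-sum over Nat bounds is a `Finset.Ico` sum. -/
lemma pv_sum_pyRange (a b : Nat) (f : Int → Int) :
    ((PySem.List.pyRange (a : Int) (b : Int)).map f).sum = ∑ i ∈ Finset.Ico a b, f (i : Int) := by
  rcases Nat.lt_or_ge a b with h | h
  swap
  · rw [PySem.List.pyRange_one_eq_nil (by exact_mod_cast h), Finset.Ico_eq_empty (by omega)]
    simp
  · rw [PySem.List.pyRange_one_cons (by exact_mod_cast h)]
    have hc : ((a : Int) + 1) = ((a + 1 : Nat) : Int) := by push_cast; ring
    rw [List.map_cons, List.sum_cons, hc, pv_sum_pyRange (a + 1) b f,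
      Finset.sum_eq_sum_Ico_succ_bot h]
termination_by b - a

/-- Variant of `pv_sum_pyRange` whose lower bound is syntactically `↑a + 1`. -/
lemma pv_sum_pyRange_succ (a b : Nat) (f : Int → Int) :
    ((PySem.List.pyRange ((a : Int) + 1) (b : Int)).map f).sum
      = ∑ i ∈ Finset.Ico (a + 1) b, f (i : Int) := by
  have hc : ((a : Int) + 1) = ((a + 1 : Nat) : Int) := by push_cast; ring
  rw [hc, pv_sum_pyRange]

lemma pv_sum_pyRange0 (b : Nat) (f : Int → Int) :
    ((PySem.List.pyRange 0 (b : Int)).map f).sum = ∑ i ∈ Finset.Ico 0 b, f (i : Int) := by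
  have := pv_sum_pyRange 0 b f
  simpa using this

/-- A counting fold (`count += 1` under a test) is the sum of 0/1 indicators. -/
lemma pv_foldl_ite_one {α : Type} (P : α → Prop) [DecidablePred P] (l : List α) (a : Int) :
    l.foldl (fun acc x => if P x then acc + 1 else acc) a
      = a + (l.map (fun x => if P x then (1 : Int) else 0)).sum := by
  have h : (fun (acc : Int) x => if P x then acc + 1 else acc)
      = (fun (acc : Int) x => acc + (if P x then (1 : Int) else 0)) := by
    funext acc x; split_ifs <;> simp
  rw [h, PySem.List.foldl_add]

/-- `list.count` on a prefix is a sum of indicators over the prefix's indices. -/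
lemma pv_count_sum (arr : List Int) (v : Int) (j : Nat) (hj : j ≤ arr.length) :
    (((arr.take j).count v : Nat) : Int)
      = ∑ i ∈ Finset.Ico 0 j, (if pvA arr i = v then (1 : Int) else 0) := by
  induction j with
  | zero => simp
  | succ j ih =>
    have hj' : j < arr.length := by omega
    rw [List.take_add_one, List.getElem?_eq_getElem hj']
    rw [Finset.sum_Ico_succ_top (by omega)]
    rw [← ih (by omega)]
    have hA : pvA arr j = arr[j] := by simp [pvA, List.getD_eq_getElem?_getD, List.getElem?_eq_getElem hj']
    rw [List.count_append, hA]
    by_cases hv : arr[j] = v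
    · simp [hv]
    · simp [hv]

/-- A as a triple `Finset` sum. -/
lemma pv_A_eq (arr : List Int) :
    count_zero_sums arr
      = ∑ i ∈ Finset.Ico 0 arr.length, ∑ j ∈ Finset.Ico (i + 1) arr.length,
          ∑ k ∈ Finset.Ico (j + 1) arr.length, pvE arr i j k := by
  unfold count_zero_sums
  simp only [pv_foldl_ite_one, PySem.List.foldl_add, pv_sum_pyRange_succ, pv_sum_pyRange0,
    PySem.List.pyGetD_natCast, zero_add]
  rfl

lemma pv_counter_nil : (PySem.Dict.counter ([] : List Int)) = (PySem.Dict.empty : PySem.Dict Int Int) :=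
  (PySem.Dict.foldl_insert_getD_add_one_eq_counter ([] : List Int)).symm

lemma pv_counter_snoc (xs : List Int) (x : Int) :
    (PySem.Dict.counter xs).insert x (((xs.count x : Nat) : Int) + 1)
      = PySem.Dict.counter (xs ++ [x]) := by
  rw [← PySem.Dict.getD_counter xs x,
    ← PySem.Dict.foldl_insert_getD_add_one_eq_counter xs,
    ← PySem.Dict.foldl_insert_getD_add_one_eq_counter (xs ++ [x]), List.foldl_append]
  simp

lemma pv_take_snoc (arr : List Int) (m : Nat) (hm : m < arr.length) :
    arr.take (m + 1) = arr.take m ++ [pvA arr m] := by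
  rw [List.take_add_one, List.getElem?_eq_getElem hm]
  simp [pvA, List.getD_eq_getElem?_getD, List.getElem?_eq_getElem hm]

/-- Invariant of B's outer loop: after `m` iterations the accumulator holds the partial
    triple count and the dict is the counter of the first `m` elements. -/
lemma pv_B_inv (arr : List Int) (m : Nat) (hm : m ≤ arr.length) :
    (PySem.List.pyRange 0 (m : Int)).foldl (pvStepB arr)
        ((0 : Int), (PySem.Dict.empty : PySem.Dict Int Int))
      = (∑ j ∈ Finset.Ico 0 m, ∑ k ∈ Finset.Ico (j + 1) arr.length,
            (((arr.take j).count (-(pvA arr j + pvA arr k)) : Nat) : Int),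
         PySem.Dict.counter (arr.take m)) := by
  induction m with
  | zero =>
    rw [PySem.List.pyRange_one_eq_nil (by simp)]
    simp [pv_counter_nil]
  | succ m ih =>
    have hm' : m < arr.length := by omega
    have hc : ((m + 1 : Nat) : Int) = (m : Int) + 1 := by push_cast; ring
    rw [hc, PySem.List.pyRange_one_succ_right (by positivity), List.foldl_append,
      ih (by omega)]
    simp only [List.foldl_cons, List.foldl_nil]
    unfold pvStepB
    simp only [PySem.List.foldl_add, pv_sum_pyRange_succ, PySem.List.pyGetD_natCast,
      PySem.Dict.getD_counter]
    have hA : arr.getD m 0 = pvA arr m := rfl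
    rw [Prod.mk.injEq]
    constructor
    · rw [Finset.sum_Ico_succ_top (Nat.zero_le _)]
      simp [pvA, List.getD]
    · rw [hA, pv_take_snoc arr m hm', ← pv_counter_snoc]

/-- B as a double `Finset` sum of prefix counts. -/
lemma pv_B_eq (arr : List Int) :
    count_zero_sums_alt arr
      = ∑ j ∈ Finset.Ico 0 arr.length, ∑ k ∈ Finset.Ico (j + 1) arr.length,
          (((arr.take j).count (-(pvA arr j + pvA arr k)) : Nat) : Int) := by
  rw [pv_alt_eq_fold, pv_B_inv arr arr.length le_rfl]

-- ===== VERDICT (by name: the statement is the Claim_ definition above) =====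
theorem count_zero_sums_spec : Claim_equal_count_zero_sums := by
  intro arr _
  unfold Spec_count_zero_sums
  rw [pv_A_eq, pv_B_eq]
  have hswap :
      (∑ i ∈ Finset.Ico 0 arr.length, ∑ j ∈ Finset.Ico (i + 1) arr.length,
          ∑ k ∈ Finset.Ico (j + 1) arr.length, pvE arr i j k)
        = ∑ j ∈ Finset.Ico 0 arr.length, ∑ i ∈ Finset.Ico 0 j,
            ∑ k ∈ Finset.Ico (j + 1) arr.length, pvE arr i j k := by
    refine Finset.sum_comm' ?_
    intro i j
    simp only [Finset.mem_Ico]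
    omega
  rw [hswap]
  refine Finset.sum_congr rfl ?_
  intro j hj
  have hjn : j ≤ arr.length := by
    simp only [Finset.mem_Ico] at hj; omega
  rw [Finset.sum_comm]
  refine Finset.sum_congr rfl ?_
  intro k _
  rw [pv_count_sum arr _ j hjn]
  refine Finset.sum_congr rfl ?_
  intro i _
  unfold pvE
  split_ifs with h1 h2 h2 <;> first | rfl | omega
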